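-- pv_equiv track=rewrite | github.com/wongzc/NUS_IT5001_PE_answer | IT5001 2022_23 SEM2 PE.py | plinko_r
-- ===== SOURCE A (Python) =====
-- def plinko_r(seq,b,m,s):
--     if not b or not m or not s:
--         return 0
--     if not seq:
--         return 0
--     p=seq[0]
--     if p==0:
--         b-=1
--     elif p==1:
--         m-=1
--     elif p==2:
--         s-=1
--     return 1+plinko_r(seq[1:],b,m,s)
-- ===== SOURCE B (Python) =====
-- def _cand(seq, val, limit, n):
--     # earliest step at which this bin empties: position of its limit-th
--     # occurrence + 1; n (= len(seq)) if it never empties within seq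
--     if limit <= 0:
--         return n
--     pos = [i for i, x in enumerate(seq) if x == val]
--     if limit <= len(pos):
--         return pos[limit - 1] + 1
--     return n
--
-- def plinko_r(seq, b, m, s):
--     if b == 0 or m == 0 or s == 0:
--         return 0
--     n = len(seq)
--     return min(_cand(seq, 0, b, n), _cand(seq, 1, m, n), _cand(seq, 2, s, n))
-- ===== Notes on version B (the rewrite author's own statement) =====
-- stated objective: faster
-- what changed: Replaces the decrement-and-recurse simulation (which copies the list with seq[1:] at every step) by computing, per bin, the index of its limit-th occurrence and returning the minimum of the three exhaustion points capped at len(seq).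
import Mathlib
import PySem

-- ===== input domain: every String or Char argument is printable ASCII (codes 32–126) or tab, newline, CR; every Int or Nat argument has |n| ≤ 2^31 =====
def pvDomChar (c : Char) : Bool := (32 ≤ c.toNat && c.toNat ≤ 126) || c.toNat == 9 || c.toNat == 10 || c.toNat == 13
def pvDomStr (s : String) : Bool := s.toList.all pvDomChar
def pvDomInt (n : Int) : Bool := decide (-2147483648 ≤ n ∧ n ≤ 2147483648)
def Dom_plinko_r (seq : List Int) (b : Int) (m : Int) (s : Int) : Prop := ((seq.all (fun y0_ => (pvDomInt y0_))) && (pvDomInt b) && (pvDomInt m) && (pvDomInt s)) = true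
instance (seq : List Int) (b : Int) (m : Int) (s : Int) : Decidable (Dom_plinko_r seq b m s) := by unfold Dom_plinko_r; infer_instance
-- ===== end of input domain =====

-- B replaces A's decrement-and-recurse simulation by three independent
-- exhaustion-point computations (index of each bin's limit-th occurrence)
-- combined with min (objective: faster; A re-slices the list each step).

-- ===== PORT A =====
def plinko_r (seq : List Int) (b : Int) (m : Int) (s : Int) : Int :=
  if b = 0 ∨ m = 0 ∨ s = 0 then 0       -- if not b or not m or not s
  else
    match seq with
    | [] => 0                            -- if not seq
    | p :: rest =>                       -- p = seq[0]; seq[1:] = rest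
      if p = 0 then 1 + plinko_r rest (b - 1) m s
      else if p = 1 then 1 + plinko_r rest b (m - 1) s
      else if p = 2 then 1 + plinko_r rest b m (s - 1)
      else 1 + plinko_r rest b m s

-- ===== PORT B =====
-- port of the comprehension [i for i, x in enumerate(seq) if x == val]
def pvPositions (seq : List Int) (v : Int) (i : Int) : List Int :=
  match seq with
  | [] => []
  | x :: rest => if x = v then i :: pvPositions rest v (i + 1) else pvPositions rest v (i + 1)

-- port of _cand
def pvCand (seq : List Int) (v : Int) (limit : Int) (n : Int) : Int :=
  if limit ≤ 0 then n
  else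
    let pos := pvPositions seq v 0
    if limit ≤ (pos.length : Int) then
      match PySem.List.pyGet? pos (limit - 1) with
      | some j => j + 1
      | none => n
    else n

def plinko_r_alt (seq : List Int) (b : Int) (m : Int) (s : Int) : Int :=
  if b = 0 ∨ m = 0 ∨ s = 0 then 0
  else
    let n : Int := seq.length
    min (min (pvCand seq 0 b n) (pvCand seq 1 m n)) (pvCand seq 2 s n)

-- ===== PRECONDITION & SPEC =====
def Spec_plinko_r (seq : List Int) (b : Int) (m : Int) (s : Int) (out : Int) : Prop := out = plinko_r_alt seq b m s
instance (seq : List Int) (b : Int) (m : Int) (s : Int) (out : Int) : Decidable (Spec_plinko_r seq b m s out) := by unfold Spec_plinko_r; infer_instance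

-- ===== CLAIM (what is proved, stated in full; the proofs are below) =====
def Claim_equal_plinko_r : Prop := ∀ (seq : List Int) (b : Int) (m : Int) (s : Int), Dom_plinko_r seq b m s → Spec_plinko_r seq b m s (plinko_r seq b m s)

-- ===== LEMMAS AND PROOFS =====

theorem pvPositions_shift (seq : List Int) (v : Int) (i : Int) :
    pvPositions seq v (i + 1) = (pvPositions seq v i).map (· + 1) := by
  induction seq generalizing i with
  | nil => simp [pvPositions]
  | cons x rest ih =>
    by_cases h : x = v <;> simp [pvPositions, h, ih]

theorem pvPositions_nonneg (seq : List Int) (v : Int) (i : Int) :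
    ∀ j ∈ pvPositions seq v i, i ≤ j := by
  induction seq generalizing i with
  | nil => simp [pvPositions]
  | cons x rest ih =>
    intro j hj
    by_cases h : x = v <;> simp [pvPositions, h] at hj
    · rcases hj with rfl | hj
      · omega
      · have := ih (i + 1) j hj; omega
    · have := ih (i + 1) j hj; omega

theorem pvCand_nonpos (seq : List Int) (v : Int) (limit : Int) (n : Int)
    (h : limit ≤ 0) : pvCand seq v limit n = n := by
  simp [pvCand, h]

theorem pvCand_pos (seq : List Int) (v : Int) (limit : Int) (n : Int)
    (hn : 1 ≤ n) : 1 ≤ pvCand seq v limit n := by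
  simp only [pvCand]
  split_ifs with h1 h2
  · exact hn
  · cases hget : PySem.List.pyGet? (pvPositions seq v 0) (limit - 1) with
    | none => simp only [hget]; exact hn
    | some j =>
      have hmem := PySem.List.mem_of_pyGet?_eq_some _ hget
      have := pvPositions_nonneg seq v 0 j hmem
      simp only [hget]
      omega
  · exact hn

-- how a candidate evolves across one consumed element
theorem pvCand_cons (p : Int) (rest : List Int) (v : Int) (limit : Int) :
    pvCand (p :: rest) v limit ((rest.length : Int) + 1) =
      if p = v ∧ 0 < limit then
        (if limit = 1 then 1 else 1 + pvCand rest v (limit - 1) (rest.length : Int))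
      else 1 + pvCand rest v limit (rest.length : Int) := by
  by_cases hl : limit ≤ 0
  · have hcond : ¬ (p = v ∧ 0 < limit) := fun h => by omega
    rw [if_neg hcond, pvCand_nonpos _ _ _ _ hl, pvCand_nonpos _ _ _ _ hl]
    omega
  · push_neg at hl
    by_cases hp : p = v
    · have hpos : pvPositions (p :: rest) v 0 = 0 :: (pvPositions rest v 0).map (· + 1) := by
        simp only [pvPositions, if_pos hp]
        norm_num
        simpa using pvPositions_shift rest v 0
      by_cases h1 : limit = 1
      · subst h1
        rw [if_pos ⟨hp, by omega⟩, if_pos rfl]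
        simp only [pvCand, hpos, List.length_cons, List.length_map]
        rw [if_neg (by omega : ¬ (1:Int) ≤ 0), if_pos (by push_cast; omega)]
        norm_num [PySem.List.pyGet?_zero_cons]
      · rw [if_pos ⟨hp, hl⟩, if_neg h1]
        simp only [pvCand, hpos, List.length_cons, List.length_map]
        rw [if_neg (by omega : ¬ limit ≤ 0), if_neg (by omega : ¬ limit - 1 ≤ 0)]
        by_cases hlen : limit - 1 ≤ ((pvPositions rest v 0).length : Int)
        · rw [if_pos (by push_cast; omega), if_pos hlen]
          have hidx2 : limit - 1 - 1 = ((limit - 2).toNat : Int) := by omega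
          rw [hidx2, PySem.List.pyGet?_natCast]
          have hidx : limit - 1 = ((limit - 2).toNat : Int) + 1 := by omega
          rw [hidx, PySem.List.pyGet?_cons_succ, PySem.List.pyGet?_natCast,
            List.getElem?_map]
          have hk : (limit - 2).toNat < (pvPositions rest v 0).length := by omega
          cases hx : (pvPositions rest v 0)[(limit - 2).toNat]? with
          | none => exact absurd (List.getElem?_eq_none_iff.mp hx) (by omega)
          | some j => simp only [hx, Option.map_some]; omega
        · rw [if_neg (by push_cast; omega), if_neg hlen]
          omega
    · have hpos : pvPositions (p :: rest) v 0 = (pvPositions rest v 0).map (· + 1) := by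
        simp only [pvPositions, if_neg hp]
        norm_num
        simpa using pvPositions_shift rest v 0
      have hcond : ¬ (p = v ∧ 0 < limit) := fun h => hp h.1
      rw [if_neg hcond]
      simp only [pvCand, hpos, List.length_map]
      rw [if_neg (by omega : ¬ limit ≤ 0), if_neg (by omega : ¬ limit ≤ 0)]
      by_cases hlen : limit ≤ ((pvPositions rest v 0).length : Int)
      · rw [if_pos hlen, if_pos hlen]
        have h0 : (0:Int) ≤ limit - 1 := by omega
        rw [PySem.List.pyGet?_of_nonneg _ h0, PySem.List.pyGet?_of_nonneg _ h0,
          List.getElem?_map]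
        have hk : (limit - 1).toNat < (pvPositions rest v 0).length := by omega
        cases hx : (pvPositions rest v 0)[(limit - 1).toNat]? with
        | none => exact absurd (List.getElem?_eq_none_iff.mp hx) (by omega)
        | some j => simp only [hx, Option.map_some]; omega
      · rw [if_neg hlen, if_neg hlen]
        omega

-- main invariant: when no bin is already empty, A equals B's min of candidates
theorem plinko_main (seq : List Int) (b m s : Int)
    (hb : b ≠ 0) (hm : m ≠ 0) (hs : s ≠ 0) :
    plinko_r seq b m s =
      min (min (pvCand seq 0 b seq.length) (pvCand seq 1 m seq.length))
          (pvCand seq 2 s seq.length) := by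
  induction seq generalizing b m s with
  | nil =>
    have hc : ∀ v limit : Int, pvCand [] v limit 0 = 0 := by
      intro v limit
      by_cases h : limit ≤ 0
      · exact pvCand_nonpos _ _ _ _ h
      · simp [pvCand, pvPositions, h]
    have h0 : plinko_r [] b m s = 0 := by
      unfold plinko_r; split_ifs <;> rfl
    rw [h0]
    simp only [List.length_nil, Nat.cast_zero, hc]
    simp
  | cons p rest ih =>
    have hg : ¬ (b = 0 ∨ m = 0 ∨ s = 0) := by tauto
    have hlen : (((p :: rest).length : Int)) = (rest.length : Int) + 1 := by
      push_cast [List.length_cons]; ring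
    have e0 := pvCand_cons p rest 0 b
    have e1 := pvCand_cons p rest 1 m
    have e2 := pvCand_cons p rest 2 s
    rw [hlen]
    by_cases hp0 : p = 0
    · subst hp0
      rw [if_neg (by norm_num : ¬((0:Int) = 1 ∧ 0 < m))] at e1
      rw [if_neg (by norm_num : ¬((0:Int) = 2 ∧ 0 < s))] at e2
      have hA : plinko_r (0 :: rest) b m s = 1 + plinko_r rest (b - 1) m s := by
        simp [plinko_r, hg]
      by_cases hb1 : b = 1
      · subst hb1
        have hA1 : plinko_r rest 0 m s = 0 := by
          unfold plinko_r
          cases rest <;> simp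
        norm_num at hA
        rw [hA, hA1]
        rw [if_pos ⟨rfl, by omega⟩, if_pos rfl] at e0
        have hc1 := pvCand_pos (0 :: rest) 1 m ((rest.length : Int) + 1) (by omega)
        have hc2 := pvCand_pos (0 :: rest) 2 s ((rest.length : Int) + 1) (by omega)
        omega
      · rw [hA, ih (b - 1) m s (by omega) hm hs]
        by_cases hbp : 0 < b
        · rw [if_pos ⟨rfl, hbp⟩, if_neg hb1] at e0
          omega
        · rw [if_neg (fun h => hbp h.2)] at e0
          have t1 := pvCand_nonpos rest 0 b (rest.length : Int) (by omega)
          have t2 := pvCand_nonpos rest 0 (b - 1) (rest.length : Int) (by omega)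
          omega
    · by_cases hp1 : p = 1
      · subst hp1
        rw [if_neg (by norm_num : ¬((1:Int) = 0 ∧ 0 < b))] at e0
        rw [if_neg (by norm_num : ¬((1:Int) = 2 ∧ 0 < s))] at e2
        have hA : plinko_r (1 :: rest) b m s = 1 + plinko_r rest b (m - 1) s := by
          simp [plinko_r, hg]
        by_cases hm1 : m = 1
        · subst hm1
          have hA1 : plinko_r rest b 0 s = 0 := by
            unfold plinko_r
            cases rest <;> simp
          norm_num at hA
          rw [hA, hA1]
          rw [if_pos ⟨rfl, by omega⟩, if_pos rfl] at e1
          have hc0 := pvCand_pos (1 :: rest) 0 b ((rest.length : Int) + 1) (by omega)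
          have hc2 := pvCand_pos (1 :: rest) 2 s ((rest.length : Int) + 1) (by omega)
          omega
        · rw [hA, ih b (m - 1) s hb (by omega) hs]
          by_cases hmp : 0 < m
          · rw [if_pos ⟨rfl, hmp⟩, if_neg hm1] at e1
            omega
          · rw [if_neg (fun h => hmp h.2)] at e1
            have t1 := pvCand_nonpos rest 1 m (rest.length : Int) (by omega)
            have t2 := pvCand_nonpos rest 1 (m - 1) (rest.length : Int) (by omega)
            omega
      · by_cases hp2 : p = 2
        · subst hp2
          rw [if_neg (by norm_num : ¬((2:Int) = 0 ∧ 0 < b))] at e0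
          rw [if_neg (by norm_num : ¬((2:Int) = 1 ∧ 0 < m))] at e1
          have hA : plinko_r (2 :: rest) b m s = 1 + plinko_r rest b m (s - 1) := by
            simp [plinko_r, hg]
          by_cases hs1 : s = 1
          · subst hs1
            have hA1 : plinko_r rest b m 0 = 0 := by
              unfold plinko_r
              cases rest <;> simp
            norm_num at hA
            rw [hA, hA1]
            rw [if_pos ⟨rfl, by omega⟩, if_pos rfl] at e2
            have hc0 := pvCand_pos (2 :: rest) 0 b ((rest.length : Int) + 1) (by omega)
            have hc1 := pvCand_pos (2 :: rest) 1 m ((rest.length : Int) + 1) (by omega)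
            omega
          · rw [hA, ih b m (s - 1) hb hm (by omega)]
            by_cases hsp : 0 < s
            · rw [if_pos ⟨rfl, hsp⟩, if_neg hs1] at e2
              omega
            · rw [if_neg (fun h => hsp h.2)] at e2
              have t1 := pvCand_nonpos rest 2 s (rest.length : Int) (by omega)
              have t2 := pvCand_nonpos rest 2 (s - 1) (rest.length : Int) (by omega)
              omega
        · rw [if_neg (fun h => hp0 h.1)] at e0
          rw [if_neg (fun h => hp1 h.1)] at e1
          rw [if_neg (fun h => hp2 h.1)] at e2
          have hA : plinko_r (p :: rest) b m s = 1 + plinko_r rest b m s := by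
            simp [plinko_r, hg, hp0, hp1, hp2]
          rw [hA, ih b m s hb hm hs]
          omega

-- ===== VERDICT (by name: the statement is the Claim_ definition above) =====
theorem plinko_r_spec : Claim_equal_plinko_r := by
  intro seq b m s _
  unfold Spec_plinko_r plinko_r_alt
  by_cases hg : b = 0 ∨ m = 0 ∨ s = 0
  · rw [if_pos hg]
    unfold plinko_r
    rw [if_pos hg]
  · rw [if_neg hg]
    push_neg at hg
    exact plinko_main seq b m s hg.1 hg.2.1 hg.2.2
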